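-- pv_equiv track=rewrite | github.com/bshongwe/ai-outlier-detection | benchmark.py | generate_synthetic_data
-- ===== SOURCE A (Python) =====
-- from typing import Dict, List
--
-- def generate_synthetic_data(n_samples: int = 1000) -> List[str]:
--     """Generate synthetic text data for benchmarking."""
--     templates = [
--         "Machine learning algorithm {} processes data efficiently",
--         "Deep neural network {} learns complex patterns",
--         "Artificial intelligence system {} transforms industries",
--         "Computer vision model {} interprets visual information",
--         "Natural language processing {} understands human text",
--         "Data science technique {} reveals hidden insights",
--         "Statistical method {} analyzes numerical patterns",
--         "Optimization algorithm {} finds optimal solutions"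
--     ]
--
--     texts = []
--     for i in range(n_samples):
--         template = templates[i % len(templates)]
--         text = template.format(f"v{i//len(templates) + 1}")
--         texts.append(text)
--
--     return texts
-- ===== SOURCE B (Python) =====
-- from typing import Dict, List
--
-- def generate_synthetic_data(n_samples: int = 1000) -> List[str]:
--     """Generate synthetic text data for benchmarking."""
--     templates = [
--         "Machine learning algorithm {} processes data efficiently",
--         "Deep neural network {} learns complex patterns",
--         "Artificial intelligence system {} transforms industries",
--         "Computer vision model {} interprets visual information",
--         "Natural language processing {} understands human text",
--         "Data science technique {} reveals hidden insights",
--         "Statistical method {} analyzes numerical patterns",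
--         "Optimization algorithm {} finds optimal solutions"
--     ]
--
--     texts = []
--     version = 1
--     remaining = n_samples
--     while remaining > 0:
--         block = [t.format(f"v{version}") for t in templates]
--         texts.extend(block[:remaining])
--         remaining -= len(templates)
--         version += 1
--     return texts
-- ===== Notes on version B (the rewrite author's own statement) =====
-- stated objective: alternative
-- what changed: Replaced the flat index loop computing a template by modulo arithmetic and the version suffix by integer division per element with a round-based while loop: a version counter, a full formatted block per round, and the final block truncated to the remaining count.
import Mathlib
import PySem

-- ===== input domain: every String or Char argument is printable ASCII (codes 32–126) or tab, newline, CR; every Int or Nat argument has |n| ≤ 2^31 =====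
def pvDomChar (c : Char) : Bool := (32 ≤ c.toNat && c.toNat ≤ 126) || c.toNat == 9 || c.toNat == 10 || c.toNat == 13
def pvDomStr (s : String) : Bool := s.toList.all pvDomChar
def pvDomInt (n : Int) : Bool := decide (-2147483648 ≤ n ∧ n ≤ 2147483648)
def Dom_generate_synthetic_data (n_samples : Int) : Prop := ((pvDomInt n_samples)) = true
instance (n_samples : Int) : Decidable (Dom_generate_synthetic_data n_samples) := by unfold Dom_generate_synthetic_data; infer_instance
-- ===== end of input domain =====

-- B replaces the single index loop with modulo/division arithmetic by a round-based loop: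
-- one version counter, full template blocks appended per round, the last block truncated to the
-- remaining count (objective: alternative decomposition, same cost; return value only, no mutation).

-- shared context: the template literals and '{}'.format(x); Str.replace is exact here because
-- each template contains exactly one "{}" and no other braces
def pvTemplates : List String :=
  [ "Machine learning algorithm {} processes data efficiently",
    "Deep neural network {} learns complex patterns",
    "Artificial intelligence system {} transforms industries",
    "Computer vision model {} interprets visual information",
    "Natural language processing {} understands human text",
    "Data science technique {} reveals hidden insights",
    "Statistical method {} analyzes numerical patterns",
    "Optimization algorithm {} finds optimal solutions" ]

def pvFormat (t x : String) : String := PySem.Str.replace t "{}" x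

-- ===== PORT A =====
def generate_synthetic_data (n_samples : Int) : List String :=
  (PySem.List.pyRange 0 n_samples 1).foldl
    (fun texts i =>
      let template := PySem.List.pyGetD pvTemplates (PySem.Int.mod i (pvTemplates.length : Int)) ""
      texts ++ [pvFormat template ("v" ++ PySem.Int.toStr (PySem.Int.floordiv i (pvTemplates.length : Int) + 1))])
    []

-- ===== PORT B =====
-- the while loop of Source B: block[:remaining] is take remaining.toNat (exact since remaining > 0)
def pvRounds (version remaining : Int) (texts : List String) : List String :=
  if remaining > 0 then
    let block := pvTemplates.map (fun t => pvFormat t ("v" ++ PySem.Int.toStr version))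
    pvRounds (version + 1) (remaining - (pvTemplates.length : Int)) (texts ++ block.take remaining.toNat)
  else texts
termination_by remaining.toNat
decreasing_by simp [pvTemplates]; omega

def generate_synthetic_data_alt (n_samples : Int) : List String :=
  pvRounds 1 n_samples []

-- ===== PRECONDITION & SPEC =====
def Spec_generate_synthetic_data (n_samples : Int) (out : List String) : Prop := out = generate_synthetic_data_alt n_samples
instance (n_samples : Int) (out : List String) : Decidable (Spec_generate_synthetic_data n_samples out) := by unfold Spec_generate_synthetic_data; infer_instance

-- ===== CLAIM (what is proved, stated in full; the proofs are below) =====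
def Claim_equal_generate_synthetic_data : Prop := ∀ (n_samples : Int), Dom_generate_synthetic_data n_samples → Spec_generate_synthetic_data n_samples (generate_synthetic_data n_samples)

-- ===== LEMMAS AND PROOFS =====

-- the common normal form: the i-th generated string
def pvItem (i : Nat) : String :=
  pvFormat (pvTemplates.getD (i % 8) "") ("v" ++ PySem.Int.toStr (((i / 8 : Nat) : Int) + 1))

lemma A_eq_map (n : Int) :
    generate_synthetic_data n = (List.range n.toNat).map pvItem := by
  unfold generate_synthetic_data
  rw [PySem.List.pyRange_one, List.foldl_map, PySem.List.foldl_append_singleton_eq_map]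
  simp only [sub_zero, zero_add, List.nil_append]
  apply List.map_congr_left
  intro i _
  rw [show (PySem.Int.mod (i : Int) (pvTemplates.length : Int)) = (((i % 8 : Nat) : Int)) by
        simp [pvTemplates],
      PySem.List.pyGetD_natCast,
      show (PySem.Int.floordiv (i : Int) (pvTemplates.length : Int)) = (((i / 8 : Nat) : Int)) by
        simp [pvTemplates]]
  rfl

lemma B_eq_map (m : Nat) (v : Int) (acc : List String) :
    pvRounds v (m : Int) acc
      = acc ++ (List.range m).map
          (fun i => pvFormat (pvTemplates.getD (i % 8) "") ("v" ++ PySem.Int.toStr (v + ((i / 8 : Nat) : Int)))) := by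
  induction m using Nat.strong_induction_on generalizing v acc with
  | _ m ih =>
  by_cases h0 : m = 0
  · subst h0
    rw [pvRounds, if_neg (by omega)]; simp
  by_cases h8 : m ≤ 8
  · interval_cases m <;>
      simp [pvRounds, pvTemplates, List.range_succ]
  · have hlen : ((pvTemplates.map (fun t => pvFormat t ("v" ++ PySem.Int.toStr v))).length) = 8 := by
      simp [pvTemplates]
    rw [pvRounds, if_pos (by positivity)]
    have htk : ((m : Int)).toNat = m := by omega
    rw [htk]
    simp only []
    rw [List.take_of_length_le (by omega)]
    have hm8 : ((m : Int) - (pvTemplates.length : Int)) = ((m - 8 : Nat) : Int) := by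
      simp [pvTemplates]; omega
    rw [hm8, ih (m - 8) (by omega)]
    have hblock : List.map (fun t => pvFormat t ("v" ++ PySem.Int.toStr v)) pvTemplates
        = (List.range 8).map (fun i => pvFormat (pvTemplates.getD (i % 8) "") ("v" ++ PySem.Int.toStr (v + ((i / 8 : Nat) : Int)))) := by
      simp [pvTemplates, List.range_succ]
    have hsplit : m = 8 + (m - 8) := by omega
    have hr : List.range m = List.range 8 ++ (List.range (m - 8)).map (8 + ·) := by
      conv_lhs => rw [hsplit]
      exact List.range_add
    rw [hr, List.map_append, List.map_map, ← List.append_assoc, hblock]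
    congr 1
    apply List.map_congr_left
    intro i _
    simp only [Function.comp]
    have h1 : (8 + i) % 8 = i % 8 := by omega
    have h2 : (8 + i) / 8 = i / 8 + 1 := by omega
    rw [h1, h2]
    congr 3
    omega

-- ===== VERDICT (by name: the statement is the Claim_ definition above) =====
theorem generate_synthetic_data_spec : Claim_equal_generate_synthetic_data := by
  intro n _
  unfold Spec_generate_synthetic_data generate_synthetic_data_alt
  rw [A_eq_map]
  have h := B_eq_map n.toNat 1 []
  simp only [List.nil_append] at h
  by_cases hn : 0 ≤ n
  · rw [Int.toNat_of_nonneg hn] at h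
    rw [h]
    apply List.map_congr_left
    intro i _
    simp [pvItem, add_comm]
  · have hz : n.toNat = 0 := by omega
    rw [hz]
    have hB : pvRounds 1 n [] = [] := by
      unfold pvRounds; rw [if_neg (by omega)]
    simp [hB]
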